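-- pv_equiv track=rewrite | github.com/DrumJB/AdventOfCode2023 | day07/day07.py | five_of_kind
-- ===== SOURCE A (Python) =====
-- def five_of_kind(hand):
--     final = 0
--     for x in hand:
--         if x != 0:
--             final = x
--     same = True
--     for h in hand:
--         if h != final and h != 0:
--             same = False
--     return same
-- ===== SOURCE B (Python) =====
-- def five_of_kind(hand):
--     return len({x for x in hand if x != 0}) <= 1
-- ===== Notes on version B (the rewrite author's own statement) =====
-- stated objective: simpler
-- what changed: Replaces A's two passes (find last nonzero sentinel, then compare every card against it) with one distinct-nonzero-value count: build the set of nonzero cards and test its cardinality <= 1.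
import Mathlib
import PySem

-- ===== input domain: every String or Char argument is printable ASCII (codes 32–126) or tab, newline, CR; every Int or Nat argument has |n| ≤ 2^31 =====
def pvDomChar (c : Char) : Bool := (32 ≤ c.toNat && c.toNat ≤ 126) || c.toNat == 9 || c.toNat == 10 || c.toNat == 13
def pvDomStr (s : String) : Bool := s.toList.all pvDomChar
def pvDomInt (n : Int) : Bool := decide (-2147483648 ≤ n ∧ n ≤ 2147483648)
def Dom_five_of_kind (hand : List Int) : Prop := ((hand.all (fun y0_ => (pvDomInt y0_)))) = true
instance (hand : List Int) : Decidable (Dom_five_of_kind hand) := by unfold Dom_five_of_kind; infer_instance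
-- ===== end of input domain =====

-- ===== PORT A =====
-- literal port of A: sentinel pass picking the last nonzero card, then a comparison pass
def five_of_kind (hand : List Int) : Bool :=
  let final : Int := hand.foldl (fun f x => if x ≠ 0 then x else f) 0
  let same : Bool := hand.foldl (fun s h => if h ≠ final ∧ h ≠ 0 then false else s) true
  same

-- ===== PORT B =====
-- B: the distinct nonzero card values form a set of size at most 1
def five_of_kind_alt (hand : List Int) : Bool :=
  decide ((PySem.Set.ofList (hand.filter (fun x => x != 0))).length ≤ 1)

-- ===== PRECONDITION & SPEC =====
def Spec_five_of_kind (hand : List Int) (out : Bool) : Prop := out = five_of_kind_alt hand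
instance (hand : List Int) (out : Bool) : Decidable (Spec_five_of_kind hand out) := by unfold Spec_five_of_kind; infer_instance

-- ===== CLAIM (what is proved, stated in full; the proofs are below) =====
def Claim_equal_five_of_kind : Prop := ∀ (hand : List Int), Dom_five_of_kind hand → Spec_five_of_kind hand (five_of_kind hand)

-- ===== LEMMAS AND PROOFS =====

-- A's final pass: if every element is zero the accumulator is returned unchanged
theorem pv_final_all_zero (l : List Int) (a : Int) (h : ∀ x ∈ l, x = 0) :
    l.foldl (fun f x => if x ≠ 0 then x else f) a = a := by
  induction l generalizing a with
  | nil => rfl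
  | cons y ys ih =>
    have hy : y = 0 := h y (by simp)
    rw [List.foldl_cons, if_neg (fun hc => hc hy)]
    exact ih a (fun x hx => h x (by simp [hx]))

-- A's final pass: if some element is nonzero, the result is a nonzero member of the list
theorem pv_final_nonzero (l : List Int) (a : Int) (h : ∃ x ∈ l, x ≠ 0) :
    l.foldl (fun f x => if x ≠ 0 then x else f) a ∈ l ∧
    l.foldl (fun f x => if x ≠ 0 then x else f) a ≠ 0 := by
  induction l generalizing a with
  | nil => simp at h
  | cons y ys ih =>
    rw [List.foldl_cons]
    by_cases hy : y = 0
    · rw [if_neg (fun hc => hc hy)]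
      obtain ⟨x, hx, hx0⟩ := h
      rcases List.mem_cons.mp hx with rfl | hx'
      · exact absurd hy hx0
      · have := ih a ⟨x, hx', hx0⟩
        exact ⟨List.mem_cons_of_mem _ this.1, this.2⟩
    · rw [if_pos hy]
      by_cases hys : ∃ x ∈ ys, x ≠ 0
      · have := ih y hys
        exact ⟨List.mem_cons_of_mem _ this.1, this.2⟩
      · push_neg at hys
        rw [pv_final_all_zero ys y (by simpa using hys)]
        exact ⟨by simp, hy⟩

-- A's checking pass computes the conjunction of the accumulator with the universal test
theorem pv_same_fold (l : List Int) (f : Int) (s : Bool) :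
    l.foldl (fun s h => if h ≠ f ∧ h ≠ 0 then false else s) s
      = (s && decide (∀ h ∈ l, h = f ∨ h = 0)) := by
  induction l generalizing s with
  | nil => simp
  | cons y ys ih =>
    rw [List.foldl_cons]
    by_cases hy : y ≠ f ∧ y ≠ 0
    · rw [if_pos hy, ih]
      have hnot : ¬ (∀ h ∈ y :: ys, h = f ∨ h = 0) := fun hh =>
        (hh y (by simp)).elim hy.1 hy.2
      rw [decide_eq_false hnot, Bool.and_false]
      simp
    · rw [if_neg hy, ih]
      have hiff : (∀ h ∈ y :: ys, h = f ∨ h = 0) ↔ (∀ h ∈ ys, h = f ∨ h = 0) := by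
        constructor
        · intro hh h hm; exact hh h (by simp [hm])
        · intro hh h hm
          rcases List.mem_cons.mp hm with rfl | hm'
          · by_cases hyf : h = f
            · exact Or.inl hyf
            · push_neg at hy
              exact Or.inr (hy hyf)
          · exact hh h hm'
      rw [decide_eq_decide.mpr hiff]

-- a duplicate-free list has length ≤ 1 iff its elements are pairwise equal
theorem pv_nodup_len_le_one (l : List Int) (hnd : l.Nodup) :
    (l.length ≤ 1) ↔ (∀ a ∈ l, ∀ b ∈ l, a = b) := by
  match l with
  | [] => simp
  | [a] => simp
  | a :: b :: t =>
    simp only [List.nodup_cons] at hnd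
    constructor
    · intro h; simp at h
    · intro h
      exact absurd (h a (by simp) b (by simp)) (by
        intro hab
        exact hnd.1 (hab ▸ List.mem_cons_self))

-- B is true iff all nonzero cards are pairwise equal
theorem pv_alt_iff (hand : List Int) :
    five_of_kind_alt hand = true ↔
      (∀ a ∈ hand, ∀ b ∈ hand, a ≠ 0 → b ≠ 0 → a = b) := by
  unfold five_of_kind_alt
  rw [decide_eq_true_iff,
    pv_nodup_len_le_one _ (PySem.Set.nodup_ofList _)]
  constructor
  · intro h a ha b hb ha0 hb0
    exact h a (by rw [PySem.Set.mem_ofList]; simp [ha, ha0]) b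
      (by rw [PySem.Set.mem_ofList]; simp [hb, hb0])
  · intro h a ha b hb
    rw [PySem.Set.mem_ofList, List.mem_filter] at ha hb
    have ha0 : a ≠ 0 := by simpa using ha.2
    have hb0 : b ≠ 0 := by simpa using hb.2
    exact h a ha.1 b hb.1 ha0 hb0

-- A is true iff all nonzero cards are pairwise equal
theorem pv_a_iff (hand : List Int) :
    five_of_kind hand = true ↔
      (∀ a ∈ hand, ∀ b ∈ hand, a ≠ 0 → b ≠ 0 → a = b) := by
  have e : five_of_kind hand
      = hand.foldl (fun s h =>
          if h ≠ (hand.foldl (fun f x => if x ≠ 0 then x else f) 0) ∧ h ≠ 0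
          then false else s) true := rfl
  rw [e, pv_same_fold]
  simp only [Bool.true_and, decide_eq_true_iff]
  constructor
  · intro h a ha b hb ha0 hb0
    have ha' := (h a ha).resolve_right ha0
    have hb' := (h b hb).resolve_right hb0
    rw [ha', hb']
  · intro h x hx
    by_cases hx0 : x = 0
    · exact Or.inr hx0
    · by_cases hz : ∃ y ∈ hand, y ≠ 0
      · have hf := pv_final_nonzero hand 0 hz
        exact Or.inl (h x hx _ hf.1 hx0 hf.2)
      · push_neg at hz
        exact absurd (hz x hx) hx0

-- ===== VERDICT (by name: the statement is the Claim_ definition above) =====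
theorem five_of_kind_spec : Claim_equal_five_of_kind := by
  intro hand _
  unfold Spec_five_of_kind
  cases ha : five_of_kind hand <;> cases hb : five_of_kind_alt hand
  · rfl
  · exact absurd ((pv_a_iff hand).mpr ((pv_alt_iff hand).mp hb)) (by simp [ha])
  · exact absurd ((pv_alt_iff hand).mpr ((pv_a_iff hand).mp ha)) (by simp [hb])
  · rfl
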